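-- pv_equiv track=rewrite | github.com/brageon/score | genre/bigram.py | detect_intention_modes
-- ===== SOURCE A (Python) =====
-- from collections import defaultdict
--
-- def detect_intention_modes(sequence):
--     positions = defaultdict(list)
--     for idx, motif in enumerate(sequence):
--         positions[motif].append(idx)
--
--     motif_gaps = []
--     for motif, pos_list in positions.items():
--         if len(pos_list) < 2:
--             continue  # skip motifs that appear only once
--         # compute consecutive gaps
--         gaps = [pos_list[i+1] - pos_list[i] for i in range(len(pos_list)-1)]
--         shortest_gap = min(gaps)
--         motif_gaps.append((motif, shortest_gap, len(pos_list)))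
--
--     motif_gaps_sorted = sorted(motif_gaps, key=lambda x: x[1])
--     return motif_gaps_sorted
-- ===== SOURCE B (Python) =====
-- def detect_intention_modes(sequence):
--     # One pass: per motif keep (last_index, best_gap_or_None, count); no position lists.
--     stats = {}
--     for idx, motif in enumerate(sequence):
--         if motif in stats:
--             last, best, cnt = stats[motif]
--             gap = idx - last
--             best = gap if best is None else min(best, gap)
--             stats[motif] = (idx, best, cnt + 1)
--         else:
--             stats[motif] = (idx, None, 1)
--     repeated = [(motif, best, cnt) for motif, (last, best, cnt) in stats.items()
--                 if best is not None]
--     repeated.sort(key=lambda t: t[1])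
--     return repeated
-- ===== Notes on version B (the rewrite author's own statement) =====
-- stated objective: alternative
-- what changed: Replaces the two-pass design (collect all position lists per motif, then recompute gap lists and their minima) by a single streaming pass that keeps only (last index, running minimum gap, count) per motif and reads the answer off directly.
import Mathlib
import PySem

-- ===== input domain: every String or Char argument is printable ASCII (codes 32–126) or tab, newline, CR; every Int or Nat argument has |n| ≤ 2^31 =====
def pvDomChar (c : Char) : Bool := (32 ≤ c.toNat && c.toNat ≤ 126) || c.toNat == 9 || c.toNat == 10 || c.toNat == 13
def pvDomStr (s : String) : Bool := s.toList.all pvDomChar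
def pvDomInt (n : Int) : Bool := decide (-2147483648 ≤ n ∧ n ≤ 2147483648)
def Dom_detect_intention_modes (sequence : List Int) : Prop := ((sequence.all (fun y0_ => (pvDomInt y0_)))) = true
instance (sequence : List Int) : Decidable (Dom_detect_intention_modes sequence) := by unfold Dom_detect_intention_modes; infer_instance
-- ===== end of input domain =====

-- B replaces A's two-pass design (position lists per motif, then gap lists and their minima)
-- by a single streaming pass keeping only (last index, running minimum gap, count) per motif.

-- ===== PORT A =====
-- positions: defaultdict(list); positions[motif].append(idx)
def pvPositionsA (sequence : List Int) : PySem.Dict Int (List Int) :=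
  (PySem.List.enumerate sequence 0).foldl
    (fun d p => d.modify p.2 [] (fun l => l ++ [p.1])) PySem.Dict.empty

-- second loop: skip singletons, gaps comprehension, min(gaps), append triple
-- (min(gaps): under the guard gaps is nonempty, so the .getD default is never used)
def pvMotifGapsA (items : List (Int × List Int)) : List (Int × Int × Int) :=
  items.foldl
    (fun acc mp =>
      if mp.2.length < 2 then acc
      else
        acc ++ [(mp.1,
          ((PySem.List.min? ((PySem.List.pyRange 0 ((mp.2.length : Int) - 1) 1).map
            (fun i => PySem.List.pyGetD mp.2 (i + 1) 0 - PySem.List.pyGetD mp.2 i 0)) (fun x => x)).getD 0),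
          (mp.2.length : Int))]) []

def detect_intention_modes (sequence : List Int) : List (Int × Int × Int) :=
  PySem.List.sorted (pvMotifGapsA (pvPositionsA sequence).items) (fun x => x.2.1) false

-- ===== PORT B =====
-- one streaming step: stats[motif] = (idx, best, cnt) updated from the previous entry
def pvStepB (d : PySem.Dict Int (Int × Option Int × Int)) (p : Int × Int) :
    PySem.Dict Int (Int × Option Int × Int) :=
  match d.get? p.2 with
  | some (last, best, cnt) =>
      d.insert p.2 (p.1, some (match best with | none => p.1 - last | some b => min b (p.1 - last)), cnt + 1)
  | none => d.insert p.2 (p.1, none, 1)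

def pvStatsB (sequence : List Int) : PySem.Dict Int (Int × Option Int × Int) :=
  (PySem.List.enumerate sequence 0).foldl pvStepB PySem.Dict.empty

-- the comprehension: keep motifs whose best gap is set
def pvRepeatedB (items : List (Int × (Int × Option Int × Int))) : List (Int × Int × Int) :=
  items.filterMap (fun mp => match mp.2.2.1 with | some b => some (mp.1, b, mp.2.2.2) | none => none)

def detect_intention_modes_alt (sequence : List Int) : List (Int × Int × Int) :=
  PySem.List.sorted (pvRepeatedB (pvStatsB sequence).items) (fun t => t.2.1) false

-- ===== PRECONDITION & SPEC =====
def Spec_detect_intention_modes (sequence : List Int) (out : List (Int × Int × Int)) : Prop := out = detect_intention_modes_alt sequence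
instance (sequence : List Int) (out : List (Int × Int × Int)) : Decidable (Spec_detect_intention_modes sequence out) := by unfold Spec_detect_intention_modes; infer_instance

-- ===== CLAIM (what is proved, stated in full; the proofs are below) =====
def Claim_equal_detect_intention_modes : Prop := ∀ (sequence : List Int), Dom_detect_intention_modes sequence → Spec_detect_intention_modes sequence (detect_intention_modes sequence)

-- ===== LEMMAS AND PROOFS =====

-- consecutive gaps of a position list, structurally
def pvGaps (l : List Int) : List Int := List.zipWith (fun b a => b - a) l.tail l

-- the summary B keeps for a motif whose (nonempty) position list is l
def pvPack (l : List Int) : Int × Option Int × Int :=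
  (l.getLast?.getD 0, PySem.List.min? (pvGaps l) (fun x => x), (l.length : Int))

-- A's gap comprehension computes pvGaps
lemma pvGapsA (l : List Int) :
    (PySem.List.pyRange 0 ((l.length : Int) - 1) 1).map
      (fun i => PySem.List.pyGetD l (i + 1) 0 - PySem.List.pyGetD l i 0) = pvGaps l := by
  apply List.ext_getElem
  · simp only [List.length_map, PySem.List.length_pyRange_one, pvGaps, List.length_zipWith,
      List.length_tail]
    omega
  · intro k h1 h2
    have hk : k + 1 < l.length := by
      simp only [List.length_map, PySem.List.length_pyRange_one] at h1
      omega
    rw [List.getElem_map, PySem.List.getElem_pyRange_one]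
    have e1 : (0 : Int) + (k : Int) + 1 = ((k + 1 : Nat) : Int) := by push_cast; ring
    have e0 : (0 : Int) + (k : Int) = ((k : Nat) : Int) := by ring
    rw [e1]
    conv_lhs => rw [e0]
    rw [PySem.List.pyGetD_natCast, PySem.List.pyGetD_natCast,
      List.getD_eq_getElem l 0 hk, List.getD_eq_getElem l 0 (by omega : k < l.length)]
    simp [pvGaps, List.getElem_zipWith, List.getElem_tail]

lemma pvMin?_append_singleton (g : List Int) (x : Int) :
    PySem.List.min? (g ++ [x]) (fun y => y) =
      some (match PySem.List.min? g (fun y => y) with | none => x | some m => min m x) := by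
  rcases hr : PySem.List.min? g (fun y => y) with _ | m
  · unfold PySem.List.min? at hr ⊢
    rw [List.foldl_append, hr]
    rfl
  · unfold PySem.List.min? at hr ⊢
    rw [List.foldl_append, hr]
    simp only [List.foldl_cons, List.foldl_nil]
    by_cases hx : x < m
    · simp [hx, min_eq_right hx.le]
    · simp [hx, min_eq_left (not_lt.mp hx)]

lemma pvGaps_append (l : List Int) (h : l ≠ []) (i : Int) :
    pvGaps (l ++ [i]) = pvGaps l ++ [i - l.getLast?.getD 0] := by
  induction l with
  | nil => exact absurd rfl h
  | cons a t ih =>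
    cases t with
    | nil => simp [pvGaps]
    | cons b t' =>
      have ih' := ih (by simp)
      show (b - a) :: pvGaps ((b :: t') ++ [i])
          = ((b - a) :: pvGaps (b :: t')) ++ [i - ((a :: b :: t').getLast?.getD 0)]
      rw [ih']
      simp

lemma pvPack_singleton (i : Int) : pvPack [i] = (i, none, 1) := by
  simp [pvPack, pvGaps, PySem.List.min?]

lemma pvPack_append (l : List Int) (h : l ≠ []) (i : Int) :
    pvPack (l ++ [i]) =
      (i, some (match (pvPack l).2.1 with
                | none => i - (pvPack l).1
                | some b => min b (i - (pvPack l).1)), (pvPack l).2.2 + 1) := by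
  simp only [pvPack, pvGaps_append l h i, pvMin?_append_singleton, List.getLast?_concat,
    Option.getD_some, List.length_append, List.length_cons, List.length_nil, Prod.mk.injEq,
    true_and]
  push_cast
  ring

-- the relation between A's and B's dictionaries
def pvRel (d : PySem.Dict Int (List Int)) (d' : PySem.Dict Int (Int × Option Int × Int)) : Prop :=
  d'.items = d.items.map (fun p => (p.1, pvPack p.2)) ∧ ∀ p ∈ d.items, p.2 ≠ []

lemma pvRel_get? {d : PySem.Dict Int (List Int)} {d' : PySem.Dict Int (Int × Option Int × Int)}
    (h : pvRel d d') (k : Int) : d'.get? k = (d.get? k).map pvPack := by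
  obtain ⟨hi, -⟩ := h
  simp only [PySem.Dict.get?, hi, List.find?_map]
  have hpred : ((fun p : Int × (Int × Option Int × Int) => p.1 == k) ∘
      fun p : Int × List Int => (p.1, pvPack p.2)) = fun p : Int × List Int => p.1 == k := rfl
  rw [hpred]
  cases List.find? (fun p : Int × List Int => p.1 == k) d.items <;> rfl

lemma pvRel_contains {d : PySem.Dict Int (List Int)} {d' : PySem.Dict Int (Int × Option Int × Int)}
    (h : pvRel d d') (k : Int) : d'.contains k = d.contains k := by
  obtain ⟨hi, -⟩ := h
  simp only [PySem.Dict.contains, hi, List.any_map]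
  rfl

lemma pvRel_step {d : PySem.Dict Int (List Int)} {d' : PySem.Dict Int (Int × Option Int × Int)}
    (h : pvRel d d') (i m : Int) :
    pvRel (d.modify m [] (fun l => l ++ [i])) (pvStepB d' (i, m)) := by
  obtain ⟨hi, hne⟩ := h
  have hg := pvRel_get? ⟨hi, hne⟩ m
  have hc := pvRel_contains ⟨hi, hne⟩ m
  unfold pvStepB
  rcases hq : d.get? m with _ | l
  · have hcf : d.contains m = false := (PySem.Dict.get?_eq_none_iff_contains d m).mp hq
    have hcf' : d'.contains m = false := by rw [hc, hcf]
    rw [hq] at hg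
    simp at hg
    rw [hg]
    refine ⟨?_, ?_⟩
    · show (d'.insert m (i, none, 1)).items = _
      simp only [PySem.Dict.modify]
      rw [PySem.Dict.getD_of_not_contains d _ hcf,
        PySem.Dict.items_insert_of_not_contains d _ hcf,
        PySem.Dict.items_insert_of_not_contains d' _ hcf']
      simp [hi, pvPack_singleton]
    · intro p hp
      simp only [PySem.Dict.modify] at hp
      rw [PySem.Dict.getD_of_not_contains d _ hcf] at hp
      rw [PySem.Dict.mem_items_insert] at hp
      rcases hp with rfl | ⟨hp, -⟩
      · simp
      · exact hne p hp
  · have hml : (m, l) ∈ d.items := PySem.Dict.mem_items_of_get?_eq_some d hq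
    have hlne : l ≠ [] := hne (m, l) hml
    have hct : d.contains m = true := by
      cases hcc : d.contains m
      · rw [(PySem.Dict.get?_eq_none_iff_contains d m).mpr hcc] at hq; cases hq
      · rfl
    have hct' : d'.contains m = true := by rw [hc, hct]
    have hgd : d.getD m [] = l := by rw [PySem.Dict.getD_eq_get?_getD, hq]; rfl
    rw [hq] at hg
    simp at hg
    rcases hp : pvPack l with ⟨last, best, cnt⟩
    rw [hp] at hg
    rw [hg]
    have hpa := pvPack_append l hlne i
    rw [hp] at hpa
    dsimp only at hpa
    dsimp only
    refine ⟨?_, ?_⟩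
    · rw [PySem.Dict.items_insert_of_contains d' _ hct']
      simp only [PySem.Dict.modify]
      rw [hgd, PySem.Dict.items_insert_of_contains d _ hct, hi, List.map_map, List.map_map]
      apply List.map_congr_left
      intro p hp2
      by_cases hpm : (p.1 == m) = true
      · simp [Function.comp, hpm, hpa]
      · simp [Function.comp, hpm]
    · intro p hp2
      simp only [PySem.Dict.modify] at hp2
      rw [hgd] at hp2
      rw [PySem.Dict.mem_items_insert] at hp2
      rcases hp2 with rfl | ⟨hp2, -⟩
      · simp
      · exact hne p hp2

lemma pvRel_foldl (ps : List (Int × Int)) (d : PySem.Dict Int (List Int))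
    (d' : PySem.Dict Int (Int × Option Int × Int)) (h : pvRel d d') :
    pvRel (ps.foldl (fun d p => d.modify p.2 [] (fun l => l ++ [p.1])) d)
      (ps.foldl pvStepB d') := by
  induction ps generalizing d d' with
  | nil => exact h
  | cons q t ih =>
    simp only [List.foldl_cons]
    exact ih _ _ (pvRel_step h q.1 q.2)

-- the two result-building passes agree entry by entry
lemma pvPhase2 (items : List (Int × List Int)) :
    ∀ acc : List (Int × Int × Int), (∀ p ∈ items, p.2 ≠ []) →
    items.foldl
      (fun acc mp =>
        if mp.2.length < 2 then acc
        else
          acc ++ [(mp.1,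
            ((PySem.List.min? ((PySem.List.pyRange 0 ((mp.2.length : Int) - 1) 1).map
              (fun i => PySem.List.pyGetD mp.2 (i + 1) 0 - PySem.List.pyGetD mp.2 i 0)) (fun x => x)).getD 0),
            (mp.2.length : Int))]) acc
    = acc ++ pvRepeatedB (items.map (fun p => (p.1, pvPack p.2))) := by
  induction items with
  | nil => intro acc _; simp [pvRepeatedB]
  | cons q t ih =>
    intro acc hne
    have hq : q.2 ≠ [] := hne q (by simp)
    have hq1 : 0 < q.2.length := List.length_pos_of_ne_nil hq
    have hnt : ∀ p ∈ t, p.2 ≠ [] := fun p hp => hne p (by simp [hp])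
    simp only [List.foldl_cons, List.map_cons]
    by_cases hlen : q.2.length < 2
    · have hgnil : pvGaps q.2 = [] := by
        have hlz : (pvGaps q.2).length = 0 := by
          simp only [pvGaps, List.length_zipWith, List.length_tail]
          omega
        exact List.eq_nil_of_length_eq_zero hlz
      have hbn : (pvPack q.2).2.1 = none := by
        simp [pvPack, hgnil, PySem.List.min?]
      rw [if_pos hlen, ih acc hnt]
      simp [pvRepeatedB, hbn]
    · have hg1 : 0 < (pvGaps q.2).length := by
        simp only [pvGaps, List.length_zipWith, List.length_tail]
        omega
      obtain ⟨b, hb⟩ : ∃ b, PySem.List.min? (pvGaps q.2) (fun x => x) = some b := by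
        cases hm : PySem.List.min? (pvGaps q.2) (fun x => x) with
        | none =>
            rw [PySem.List.min?_eq_none_iff] at hm
            rw [hm] at hg1
            simp at hg1
        | some b => exact ⟨b, rfl⟩
      rw [if_neg hlen, pvGapsA q.2, hb]
      rw [ih _ hnt]
      simp [pvRepeatedB, pvPack, hb, List.append_assoc]

-- ===== VERDICT (by name: the statement is the Claim_ definition above) =====
theorem detect_intention_modes_spec : Claim_equal_detect_intention_modes := by
  intro sequence _
  unfold Spec_detect_intention_modes detect_intention_modes detect_intention_modes_alt
  have h0 : pvRel PySem.Dict.empty PySem.Dict.empty := by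
    refine ⟨by simp [PySem.Dict.empty], ?_⟩
    intro p hp
    simp [PySem.Dict.empty] at hp
  have hrel : pvRel (pvPositionsA sequence) (pvStatsB sequence) :=
    pvRel_foldl (PySem.List.enumerate sequence 0) PySem.Dict.empty PySem.Dict.empty h0
  have h2 : pvMotifGapsA (pvPositionsA sequence).items
      = pvRepeatedB ((pvPositionsA sequence).items.map (fun p => (p.1, pvPack p.2))) := by
    simpa [pvMotifGapsA] using pvPhase2 (pvPositionsA sequence).items [] hrel.2
  rw [h2, ← hrel.1]
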